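-- pv_equiv track=rewrite | github.com/krzysztof-turowski/programming-contests | google-code-jam/2011-round-2/spinning_blade.py | solve
-- ===== SOURCE A (Python) =====
-- import copy
-- import itertools
--
-- def aggregate(A):
--     for i, a in enumerate(A):
--         A[i] = list(itertools.accumulate(a))
--     for j, _ in enumerate(A[0]):
--         for i in range(1, len(A)):
--             A[i][j] += A[i - 1][j]
--     return A
--
-- def get_value(A, B, x, y, D):
--     out = A[x - 1][y - 1]
--     if x - D > 0:
--         out -= A[x - D - 1][y - 1]
--     if y - D > 0:
--         out -= A[x - 1][y - D - 1]
--     if x - D > 0 and y - D > 0: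
--         out += A[x - D - 1][y - D - 1]
--     return out - B[x - 1][y - 1] - B[x - D][y - 1] - B[x - 1][y - D] - B[x - D][y - D]
--
-- def solve(R, C, B0):
--     B = aggregate(copy.deepcopy(B0))
--     X0 = [[(2 * i + 1) * b for b in row] for i, row in enumerate(B0)]
--     X = aggregate(copy.deepcopy(X0))
--     Y0 = [[(2 * j + 1) * b for j, b in enumerate(row)] for row in B0]
--     Y = aggregate(copy.deepcopy(Y0))
--     for D in range(min(R, C), 2, -1):
--         for x in range(D, R + 1):
--             for y in range(D, C + 1):
--                 mass = get_value(B, B0, x, y, D)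
--                 if get_value(X, X0, x, y, D) != (2 * x - D) * mass:
--                     continue
--                 if get_value(Y, Y0, x, y, D) != (2 * y - D) * mass:
--                     continue
--                 return D
--     return 'IMPOSSIBLE'
-- ===== SOURCE B (Python) =====
-- def solve(R, C, B0):
--     for D in range(min(R, C), 2, -1):
--         for x in range(D, R + 1):
--             for y in range(D, C + 1):
--                 cells = [(i, j) for i in range(x - D, x) for j in range(y - D, y)
--                          if not (i in (x - D, x - 1) and j in (y - D, y - 1))]
--                 mass = sum(B0[i][j] for i, j in cells)
--                 if sum((2 * i + 1) * B0[i][j] for i, j in cells) != (2 * x - D) * mass: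
--                     continue
--                 if sum((2 * j + 1) * B0[i][j] for i, j in cells) != (2 * y - D) * mass:
--                     continue
--                 return D
--     return 'IMPOSSIBLE'
-- ===== Notes on version B (the rewrite author's own statement) =====
-- stated objective: simpler
-- what changed: B drops the three 2D prefix-sum tables and the inclusion-exclusion helper entirely and, for each candidate square, directly sums mass and both torques over the square's non-corner cells.
-- outside the precondition, e.g. on solve(3, 4, [[1, -1, 2], [0, -2, 0], [1, -1, 2], [2, -1, 2, 0, 1]]): A returns 3, B returns 3
import Mathlib
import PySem

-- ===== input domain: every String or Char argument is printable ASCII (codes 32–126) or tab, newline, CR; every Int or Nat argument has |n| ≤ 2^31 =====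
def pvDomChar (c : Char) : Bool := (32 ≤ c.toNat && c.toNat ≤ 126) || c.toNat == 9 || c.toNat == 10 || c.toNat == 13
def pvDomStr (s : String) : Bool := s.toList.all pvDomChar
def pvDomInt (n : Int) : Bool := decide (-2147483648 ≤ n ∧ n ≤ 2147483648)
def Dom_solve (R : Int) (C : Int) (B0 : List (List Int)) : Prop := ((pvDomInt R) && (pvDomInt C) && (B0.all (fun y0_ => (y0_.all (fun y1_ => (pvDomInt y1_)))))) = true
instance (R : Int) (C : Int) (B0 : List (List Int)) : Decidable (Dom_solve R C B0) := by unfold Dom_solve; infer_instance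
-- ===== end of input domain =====

-- B replaces A's three 2D prefix-sum tables and inclusion-exclusion helper by a direct
-- summation of mass and both torques over each candidate square's non-corner cells
-- (same scan order, identical results, including the returned side length); simpler, not faster.

-- shared indexing helper: M[i][j] as Python reads it (total form; in range under Pre_)
def g2 (M : List (List Int)) (i j : Int) : Int :=
  PySem.List.pyGetD (PySem.List.pyGetD M i []) j 0

-- ===== PORT A =====
-- list(itertools.accumulate(a))
def accRow (a : List Int) : List Int :=
  (a.foldl (fun (st : List Int × Int) b => (st.1 ++ [st.2 + b], st.2 + b)) ([], 0)).1

-- A[i][j] = v (total form of the in-place update)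
def upd2 (M : List (List Int)) (i j : Int) (v : Int) : List (List Int) :=
  PySem.List.pySetD M i (PySem.List.pySetD (PySem.List.pyGetD M i []) j v)

def aggregate (A : List (List Int)) : List (List Int) :=
  (PySem.List.pyRange 0 (((A.map accRow).headD []).length : Int) 1).foldl (fun M j =>
    (PySem.List.pyRange 1 (M.length : Int) 1).foldl (fun M i =>
      upd2 M i j (g2 M i j + g2 M (i - 1) j)) M) (A.map accRow)

def get_value (A B : List (List Int)) (x y D : Int) : Int :=
  let out := g2 A (x - 1) (y - 1)
  let out := if x - D > 0 then out - g2 A (x - D - 1) (y - 1) else out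
  let out := if y - D > 0 then out - g2 A (x - 1) (y - D - 1) else out
  let out := if x - D > 0 ∧ y - D > 0 then out + g2 A (x - D - 1) (y - D - 1) else out
  out - g2 B (x - 1) (y - 1) - g2 B (x - D) (y - 1) - g2 B (x - 1) (y - D) - g2 B (x - D) (y - D)

def solve (R : Int) (C : Int) (B0 : List (List Int)) : String :=
  let B := aggregate B0
  let X0 := (PySem.List.enumerate B0 0).map (fun p => p.2.map (fun b => (2 * p.1 + 1) * b))
  let X := aggregate X0
  let Y0 := B0.map (fun row => (PySem.List.enumerate row 0).map (fun p => (2 * p.1 + 1) * p.2))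
  let Y := aggregate Y0
  match (PySem.List.pyRange (min R C) 2 (-1)).findSome? (fun D =>
    (PySem.List.pyRange D (R + 1) 1).findSome? (fun x =>
      (PySem.List.pyRange D (C + 1) 1).findSome? (fun y =>
        let mass := get_value B B0 x y D
        if get_value X X0 x y D ≠ (2 * x - D) * mass then none
        else if get_value Y Y0 x y D ≠ (2 * y - D) * mass then none
        else some D))) with
  | some D => PySem.Int.toStr D
  | none => "IMPOSSIBLE"

-- ===== PORT B =====
-- [(i, j) for i in range(x-D, x) for j in range(y-D, y) if not (i in (x-D, x-1) and j in (y-D, y-1))]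
def cellsB (x y D : Int) : List (Int × Int) :=
  (PySem.List.pyRange (x - D) x 1).flatMap (fun i =>
    ((PySem.List.pyRange (y - D) y 1).filter
        (fun j => !((i == x - D || i == x - 1) && (j == y - D || j == y - 1)))).map (fun j => (i, j)))

def solve_alt (R : Int) (C : Int) (B0 : List (List Int)) : String :=
  match (PySem.List.pyRange (min R C) 2 (-1)).findSome? (fun D =>
    (PySem.List.pyRange D (R + 1) 1).findSome? (fun x =>
      (PySem.List.pyRange D (C + 1) 1).findSome? (fun y =>
        let cells := cellsB x y D
        let mass := (cells.map (fun p => g2 B0 p.1 p.2)).sum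
        if (cells.map (fun p => (2 * p.1 + 1) * g2 B0 p.1 p.2)).sum ≠ (2 * x - D) * mass then none
        else if (cells.map (fun p => (2 * p.2 + 1) * g2 B0 p.1 p.2)).sum ≠ (2 * y - D) * mass then none
        else some D))) with
  | some D => PySem.Int.toStr D
  | none => "IMPOSSIBLE"

-- ===== PRECONDITION & SPEC =====
-- Pre_ asks for a nonempty grid whose rows are at least as long as the first row, and whose
-- stated dimensions R and C stay within the grid whenever the search loops actually run
-- (min(R,C) ≥ 3): on the empty grid or with a row shorter than the first A raises IndexError
-- in aggregate, and with oversized R or C A raises IndexError unless an early return in the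
-- scan happens to precede the first out-of-range read.
def Pre_solve (R : Int) (C : Int) (B0 : List (List Int)) : Prop :=
  B0 ≠ [] ∧ (∀ row ∈ B0, (B0.headD []).length ≤ row.length) ∧
    (3 ≤ min R C → R ≤ (B0.length : Int) ∧ C ≤ ((B0.headD []).length : Int))
instance (R : Int) (C : Int) (B0 : List (List Int)) : Decidable (Pre_solve R C B0) := by
  unfold Pre_solve; infer_instance

def pvWitness_solve : Int × Int × List (List Int) := (3, 3, [[0, 1, 0], [0, 0, 0], [0, 0, 0]])

def Spec_solve (R : Int) (C : Int) (B0 : List (List Int)) (out : String) : Prop := out = solve_alt R C B0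
instance (R : Int) (C : Int) (B0 : List (List Int)) (out : String) : Decidable (Spec_solve R C B0 out) := by
  unfold Spec_solve; infer_instance

-- ===== CLAIM (what is proved, stated in full; the proofs are below) =====
def Claim_equal_solve : Prop := ∀ (R : Int) (C : Int) (B0 : List (List Int)), Dom_solve R C B0 → Pre_solve R C B0 → Spec_solve R C B0 (solve R C B0)

-- ===== LEMMAS AND PROOFS =====

-- Nat-indexed matrix entry
def eM (M : List (List Int)) (i j : Nat) : Int := (M.getD i []).getD j 0

-- prefix sums used to characterise `aggregate`
def rowPre (M : List (List Int)) (i j : Nat) : Int := ∑ k ∈ Finset.range j, eM M i k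
def pre2 (M : List (List Int)) (i j : Nat) : Int := ∑ r ∈ Finset.range i, rowPre M r j
-- column prefix (inclusive) of a matrix
def cp (M : List (List Int)) (i j : Nat) : Int := ∑ r ∈ Finset.range (i + 1), eM M r j

lemma g2_natCast (M : List (List Int)) (i j : Nat) : g2 M (i : Int) (j : Int) = eM M i j := by
  simp [g2, eM]

lemma findSome?_congr {α β : Type} (l : List α) (f g : α → Option β)
    (h : ∀ a ∈ l, f a = g a) : l.findSome? f = l.findSome? g := by
  induction l with
  | nil => rfl
  | cons x t ih =>
    simp only [List.findSome?_cons, h x (List.mem_cons_self)]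
    cases g x with
    | some v => rfl
    | none => exact ih (fun a ha => h a (List.mem_cons_of_mem _ ha))

lemma accRow_foldl (a : List Int) (l : List Int) (s : Int) :
    a.foldl (fun (st : List Int × Int) b => (st.1 ++ [st.2 + b], st.2 + b)) (l, s)
    = (l ++ (List.range a.length).map (fun j => s + ∑ k ∈ Finset.range (j + 1), a.getD k 0),
       s + ∑ k ∈ Finset.range a.length, a.getD k 0) := by
  induction a generalizing l s with
  | nil => simp
  | cons b t ih =>
    simp only [List.foldl_cons, ih, List.length_cons]
    refine Prod.ext ?_ ?_
    · rw [List.range_succ_eq_map]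
      simp only [List.map_cons, List.map_map, List.append_assoc]
      congr 1
      simp only [List.singleton_append, List.cons.injEq]
      constructor
      · simp
      · apply List.map_congr_left
        intro j _
        simp only [Function.comp_apply]
        rw [Finset.sum_range_succ' (fun k => (b :: t).getD k 0)]
        simp
        ring
    · rw [Finset.sum_range_succ' (fun k => (b :: t).getD k 0)]
      simp
      ring

lemma accRow_length (a : List Int) : (accRow a).length = a.length := by
  simp [accRow, accRow_foldl]

lemma accRow_getD (a : List Int) (j : Nat) (hj : j < a.length) :
    (accRow a).getD j 0 = ∑ k ∈ Finset.range (j + 1), a.getD k 0 := by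
  simp only [accRow, accRow_foldl, List.nil_append]
  rw [List.getD_eq_getElem?_getD, List.getElem?_map, List.getElem?_range hj]
  simp

lemma eM_map_accRow (M : List (List Int)) (i j : Nat) (hi : i < M.length)
    (hj : j < (M.getD i []).length) :
    eM (M.map accRow) i j = ∑ k ∈ Finset.range (j + 1), eM M i k := by
  have hMi : M.getD i [] = M[i] := by
    rw [List.getD_eq_getElem?_getD, List.getElem?_eq_getElem hi]; rfl
  have hmap : (M.map accRow).getD i [] = accRow M[i] := by
    rw [List.getD_eq_getElem?_getD, List.getElem?_map, List.getElem?_eq_getElem hi]; rfl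
  rw [hMi] at hj
  unfold eM
  rw [hmap, hMi]
  exact accRow_getD _ _ hj

lemma length_map_accRow_getD (M : List (List Int)) (i : Nat) :
    ((M.map accRow).getD i []).length = (M.getD i []).length := by
  rw [List.getD_eq_getElem?_getD, List.getD_eq_getElem?_getD, List.getElem?_map]
  cases h : M[i]? <;> simp [accRow_length]

lemma upd2_natCast (M : List (List Int)) (i j : Nat) (v : Int) :
    upd2 M (i : Int) (j : Int) v = M.set i ((M.getD i []).set j v) := by
  simp [upd2]

lemma getD_set_list (M : List (List Int)) (a : Nat) (r : List Int) (i : Nat) (ha : a < M.length) :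
    (M.set a r).getD i [] = if i = a then r else M.getD i [] := by
  by_cases h : i = a
  · subst h; simp [List.getD_eq_getElem?_getD, ha]
  · rw [List.getD_eq_getElem?_getD, List.getElem?_set, if_neg (Ne.symm h), if_neg h,
      ← List.getD_eq_getElem?_getD]

lemma getD_set_self (r : List Int) (j j' : Nat) (v : Int) (hj : j < r.length) :
    (r.set j v).getD j' 0 = if j' = j then v else r.getD j' 0 := by
  by_cases h : j' = j
  · subst h; simp [List.getD_eq_getElem?_getD, hj]
  · rw [List.getD_eq_getElem?_getD, List.getElem?_set, if_neg (Ne.symm h), if_neg h,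
      ← List.getD_eq_getElem?_getD]

lemma colFold_inv (S : List (List Int)) (j : Nat)
    (hj : ∀ i, i < S.length → j < (S.getD i []).length) :
    ∀ (b a : Nat), a + b = S.length → 1 ≤ a →
    ∀ (S' : List (List Int)), S'.length = S.length →
    (∀ i, (S'.getD i []).length = (S.getD i []).length) →
    (∀ i j', eM S' i j' = if j' = j ∧ i < a then cp S i j else eM S i j') →
    (let T := (PySem.List.pyRange (a : Int) (S.length : Int) 1).foldl
        (fun M i => upd2 M i (j : Int) (g2 M i (j : Int) + g2 M (i - 1) (j : Int))) S'
     T.length = S.length ∧ (∀ i, (T.getD i []).length = (S.getD i []).length) ∧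
       (∀ i j', eM T i j' = if j' = j ∧ i < S.length then cp S i j else eM S i j')) := by
  intro b
  induction b with
  | zero =>
    intro a hab h1 S' hlen hrow hinv
    have ha : a = S.length := by omega
    subst ha
    rw [PySem.List.pyRange_one_eq_nil (le_refl _)]
    exact ⟨hlen, hrow, hinv⟩
  | succ b ih =>
    intro a hab h1 S' hlen hrow hinv
    have haS : (a : Int) < (S.length : Int) := by exact_mod_cast (by omega : a < S.length)
    rw [PySem.List.pyRange_one_cons haS, List.foldl_cons]
    have hcast : (a : Int) + 1 = ((a + 1 : Nat) : Int) := by push_cast; ring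
    have hcast2 : (a : Int) - 1 = ((a - 1 : Nat) : Int) := by
      have h1' : 1 ≤ a := h1
      push_cast [h1']; ring
    have haS' : a < S'.length := by omega
    -- the updated value is the column prefix at row a
    have hv : g2 S' (a : Int) (j : Int) + g2 S' ((a : Int) - 1) (j : Int) = cp S a j := by
      rw [hcast2, g2_natCast, g2_natCast, hinv a j, hinv (a - 1) j]
      rw [if_neg (show ¬(j = j ∧ a < a) by omega), if_pos (show j = j ∧ a - 1 < a by omega)]
      unfold cp
      have he : a - 1 + 1 = a := by omega
      rw [he, Finset.sum_range_succ]
      ring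
    set v := g2 S' (a : Int) (j : Int) + g2 S' ((a : Int) - 1) (j : Int) with hvdef
    rw [hcast, upd2_natCast S' a j v]
    apply ih (a + 1) (by omega) (by omega)
    · simp [hlen]
    · intro i
      rw [getD_set_list _ _ _ _ haS']
      by_cases h : i = a
      · rw [if_pos h, List.length_set, h, hrow]
      · rw [if_neg h, hrow]
    · intro i j'
      unfold eM
      rw [getD_set_list _ _ _ _ haS']
      by_cases h : i = a
      · rw [if_pos h]
        have hlen_row : j < (S'.getD a []).length := by rw [hrow]; exact hj a (by omega)
        rw [getD_set_self _ _ _ _ hlen_row]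
        by_cases h2 : j' = j
        · rw [if_pos h2, if_pos (show j' = j ∧ i < a + 1 from ⟨h2, by omega⟩), h, hv]
        · rw [if_neg h2, if_neg (show ¬(j' = j ∧ i < a + 1) from fun hc => h2 hc.1)]
          have := hinv a j'
          unfold eM at this
          rw [this, if_neg (show ¬(j' = j ∧ a < a) from fun hc => h2 hc.1), h]
      · have := hinv i j'
        unfold eM at this
        rw [if_neg h, this]
        by_cases h2 : j' = j ∧ i < a
        · rw [if_pos h2, if_pos ⟨h2.1, by omega⟩]
        · rw [if_neg h2, if_neg (show ¬(j' = j ∧ i < a + 1) from fun hc => h2 ⟨hc.1, by omega⟩)]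

lemma aggFold_inv (A1 : List (List Int)) (L : Nat)
    (hrect : ∀ i, i < A1.length → L ≤ (A1.getD i []).length) :
    ∀ (b c : Nat), c + b = L → 1 ≤ A1.length →
    ∀ (S' : List (List Int)), S'.length = A1.length →
    (∀ i, (S'.getD i []).length = (A1.getD i []).length) →
    (∀ i j', eM S' i j' = if j' < c ∧ i < A1.length then cp A1 i j' else eM A1 i j') →
    (let T := (PySem.List.pyRange (c : Int) (L : Int) 1).foldl
        (fun M j => (PySem.List.pyRange 1 (M.length : Int) 1).foldl
          (fun M i => upd2 M i j (g2 M i j + g2 M (i - 1) j)) M) S'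
     ∀ i j', eM T i j' = if j' < L ∧ i < A1.length then cp A1 i j' else eM A1 i j') := by
  intro b
  induction b with
  | zero =>
    intro c hcb hn S' hlen hrow hinv
    have hc : c = L := by omega
    subst hc
    rw [PySem.List.pyRange_one_eq_nil (le_refl _)]
    exact hinv
  | succ b ih =>
    intro c hcb hn S' hlen hrow hinv
    have hcL : (c : Int) < (L : Int) := by exact_mod_cast (by omega : c < L)
    rw [PySem.List.pyRange_one_cons hcL, List.foldl_cons]
    have hj' : ∀ i, i < S'.length → c < (S'.getD i []).length := by
      intro i hi
      have := hrect i (by omega)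
      rw [hrow i]
      omega
    have hinit : ∀ i j', eM S' i j' = if j' = c ∧ i < 1 then cp S' i c else eM S' i j' := by
      intro i j'
      by_cases hx : j' = c ∧ i < 1
      · obtain ⟨hx1, hx2⟩ := hx
        have hi0 : i = 0 := by omega
        subst hi0; subst hx1
        rw [if_pos ⟨rfl, by omega⟩]
        unfold cp
        rw [Finset.sum_range_one]
      · rw [if_neg hx]
    obtain ⟨hT1, hT2, hT3⟩ := colFold_inv S' c hj' (S'.length - 1) 1 (by omega) (by omega)
      S' rfl (fun _ => rfl) hinit
    simp only [Nat.cast_one] at hT1 hT2 hT3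
    have hcast : (c : Int) + 1 = ((c + 1 : Nat) : Int) := by push_cast; ring
    rw [hcast]
    apply ih (c + 1) (by omega) hn
    · rw [hT1, hlen]
    · intro i; rw [hT2 i, hrow i]
    · intro i j'
      rw [hT3 i j']
      by_cases hc2 : j' = c
      · subst hc2
        by_cases hi : i < A1.length
        · rw [if_pos ⟨rfl, by omega⟩, if_pos ⟨by omega, hi⟩]
          unfold cp
          apply Finset.sum_congr rfl
          intro r _
          rw [hinv r j', if_neg (by omega)]
        · rw [if_neg (by omega), if_neg (by omega), hinv i j', if_neg (by omega)]
      · rw [if_neg (fun hcc => hc2 hcc.1), hinv i j']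
        by_cases h2 : j' < c ∧ i < A1.length
        · rw [if_pos h2, if_pos ⟨by omega, h2.2⟩]
        · rw [if_neg h2, if_neg (fun hcc => h2 ⟨by omega, hcc.2⟩)]

lemma headD_map_accRow (M : List (List Int)) :
    ((M.map accRow).headD []).length = (M.headD []).length := by
  cases M <;> simp [accRow_length]

lemma aggregate_eM (M : List (List Int))
    (hrect : ∀ i, i < M.length → (M.headD []).length ≤ (M.getD i []).length) :
    ∀ i j, i < M.length → j < (M.headD []).length →
      eM (aggregate M) i j = pre2 M (i + 1) (j + 1) := by
  intro i j hi hj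
  have hn : 1 ≤ M.length := by omega
  have hrectA1 : ∀ i, i < (M.map accRow).length → (M.headD []).length ≤ ((M.map accRow).getD i []).length := by
    intro r hr
    rw [length_map_accRow_getD]
    exact hrect r (by simpa using hr)
  have key := aggFold_inv (M.map accRow) (M.headD []).length hrectA1
    ((M.headD []).length) 0 (by omega) (by simpa using hn)
    (M.map accRow) rfl (fun _ => rfl)
    (fun i j' => by rw [if_neg (by omega)])
  unfold aggregate
  rw [headD_map_accRow]
  simp only [Nat.cast_zero] at key
  have := key i j
  rw [if_pos ⟨hj, by simpa using hi⟩] at this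
  rw [this]
  unfold cp pre2 rowPre
  apply Finset.sum_congr rfl
  intro r hr
  rw [Finset.mem_range] at hr
  exact eM_map_accRow M r j (by omega) (by have := hrect r (by omega); omega)

lemma headD_eq_getD (M : List (List Int)) : M.headD [] = M.getD 0 [] := by
  cases M <;> simp

lemma pre2_box (M : List (List Int)) (a b d : Nat) (hda : d ≤ a) (hdb : d ≤ b) :
    pre2 M a b - pre2 M (a - d) b - pre2 M a (b - d) + pre2 M (a - d) (b - d)
    = ∑ k ∈ Finset.range d, ∑ l ∈ Finset.range d, eM M (a - d + k) (b - d + l) := by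
  have h1 : ∀ b', pre2 M a b' - pre2 M (a - d) b' = ∑ r ∈ Finset.Ico (a - d) a, rowPre M r b' := by
    intro b'
    unfold pre2
    rw [Finset.sum_Ico_eq_sub _ (by omega : a - d ≤ a)]
  have key : pre2 M a b - pre2 M (a - d) b - pre2 M a (b - d) + pre2 M (a - d) (b - d)
      = ∑ r ∈ Finset.Ico (a - d) a, (rowPre M r b - rowPre M r (b - d)) := by
    rw [Finset.sum_sub_distrib, ← h1 b, ← h1 (b - d)]; ring
  rw [key, Finset.sum_Ico_eq_sum_range]
  rw [show a - (a - d) = d from by omega]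
  apply Finset.sum_congr rfl
  intro k _
  have h2 : rowPre M (a - d + k) b - rowPre M (a - d + k) (b - d)
      = ∑ c ∈ Finset.Ico (b - d) b, eM M (a - d + k) c := by
    unfold rowPre
    rw [Finset.sum_Ico_eq_sub _ (by omega : b - d ≤ b)]
  rw [h2, Finset.sum_Ico_eq_sum_range, show b - (b - d) = d from by omega]

lemma pre2_zero_left (M : List (List Int)) (b : Nat) : pre2 M 0 b = 0 := by
  simp [pre2]

lemma pre2_zero_right (M : List (List Int)) (a : Nat) : pre2 M a 0 = 0 := by
  simp [pre2, rowPre]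

lemma get_value_eq (M : List (List Int)) (n L : Nat)
    (hlen : M.length = n) (hhead : (M.headD []).length = L)
    (hrow : ∀ i, i < n → L ≤ (M.getD i []).length)
    (x y D : Int) (hD : 3 ≤ D) (hx : D ≤ x) (hxR : x ≤ (n : Int)) (hy : D ≤ y)
    (hyC : y ≤ (L : Int)) :
    get_value (aggregate M) M x y D
    = (∑ k ∈ Finset.range D.toNat, ∑ l ∈ Finset.range D.toNat,
        eM M ((x - D).toNat + k) ((y - D).toNat + l))
      - g2 M (x - 1) (y - 1) - g2 M (x - D) (y - 1) - g2 M (x - 1) (y - D)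
      - g2 M (x - D) (y - D) := by
  have hn1 : 1 ≤ n := by omega
  have hrect : ∀ i, i < M.length → (M.headD []).length ≤ (M.getD i []).length := by
    intro i hi; rw [hhead]; exact hrow i (by omega)
  have hagg : ∀ i j : Nat, i < n → j < L →
      eM (aggregate M) i j = pre2 M (i + 1) (j + 1) := by
    intro i j hi hj
    exact aggregate_eM M hrect i j (by omega) (by omega)
  set a := x.toNat with hadef
  set b := y.toNat with hbdef
  set d := D.toNat with hddef
  have hxa : x = (a : Int) := by omega
  have hyb : y = (b : Int) := by omega
  have hDd : D = (d : Int) := by omega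
  have hda : 3 ≤ d := by omega
  have han : a ≤ n := by omega
  have hbL : b ≤ L := by omega
  have hdax : d ≤ a := by omega
  have hdby : d ≤ b := by omega
  -- the four prefix-table accesses
  have acc1 : g2 (aggregate M) (x - 1) (y - 1) = pre2 M a b := by
    rw [show x - 1 = ((a - 1 : Nat) : Int) from by omega,
      show y - 1 = ((b - 1 : Nat) : Int) from by omega, g2_natCast]
    rw [hagg (a - 1) (b - 1) (by omega) (by omega)]
    congr 1 <;> omega
  have acc2 : d < a → g2 (aggregate M) (x - D - 1) (y - 1) = pre2 M (a - d) b := by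
    intro h
    rw [show x - D - 1 = ((a - d - 1 : Nat) : Int) from by omega,
      show y - 1 = ((b - 1 : Nat) : Int) from by omega, g2_natCast]
    rw [hagg (a - d - 1) (b - 1) (by omega) (by omega)]
    congr 1 <;> omega
  have acc3 : d < b → g2 (aggregate M) (x - 1) (y - D - 1) = pre2 M a (b - d) := by
    intro h
    rw [show x - 1 = ((a - 1 : Nat) : Int) from by omega,
      show y - D - 1 = ((b - d - 1 : Nat) : Int) from by omega, g2_natCast]
    rw [hagg (a - 1) (b - d - 1) (by omega) (by omega)]
    congr 1 <;> omega
  have acc4 : d < a → d < b → g2 (aggregate M) (x - D - 1) (y - D - 1) = pre2 M (a - d) (b - d) := by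
    intro h1 h2
    rw [show x - D - 1 = ((a - d - 1 : Nat) : Int) from by omega,
      show y - D - 1 = ((b - d - 1 : Nat) : Int) from by omega, g2_natCast]
    rw [hagg (a - d - 1) (b - d - 1) (by omega) (by omega)]
    congr 1 <;> omega
  have hbox : (∑ k ∈ Finset.range d, ∑ l ∈ Finset.range d,
      eM M ((x - D).toNat + k) ((y - D).toNat + l))
      = pre2 M a b - pre2 M (a - d) b - pre2 M a (b - d) + pre2 M (a - d) (b - d) := by
    rw [pre2_box M a b d hdax hdby]
    apply Finset.sum_congr rfl
    intro k _
    apply Finset.sum_congr rfl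
    intro l _
    congr 1 <;> omega
  simp only [get_value]
  rw [acc1]
  by_cases hxd : x - D > 0
  · have hda' : d < a := by omega
    rw [if_pos hxd, acc2 hda']
    by_cases hyd : y - D > 0
    · have hdb' : d < b := by omega
      rw [if_pos hyd, acc3 hdb', if_pos ⟨hxd, hyd⟩, acc4 hda' hdb', hbox]
    · rw [if_neg hyd, if_neg (fun hc => hyd hc.2), hbox,
        show b - d = 0 from by omega, pre2_zero_right, pre2_zero_right]
      ring
  · rw [if_neg hxd]
    by_cases hyd : y - D > 0
    · have hdb' : d < b := by omega
      rw [if_pos hyd, acc3 hdb', if_neg (fun hc => hxd hc.1), hbox,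
        show a - d = 0 from by omega, pre2_zero_left, pre2_zero_left]
      ring
    · rw [if_neg hyd, if_neg (fun hc => hxd hc.1), hbox,
        show a - d = 0 from by omega, show b - d = 0 from by omega,
        pre2_zero_left, pre2_zero_left, pre2_zero_right]
      ring

lemma sum_map_range (n : Nat) (f : Nat → Int) :
    ((List.range n).map f).sum = ∑ k ∈ Finset.range n, f k := by
  induction n with
  | zero => simp
  | succ n ih => rw [List.range_succ, List.map_append, List.sum_append, Finset.sum_range_succ, ih]; simp

lemma sum_map_pyRange (a b : Int) (g : Int → Int) :
    ((PySem.List.pyRange a b 1).map g).sum = ∑ k ∈ Finset.range (b - a).toNat, g (a + k) := by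
  rw [PySem.List.pyRange_one, List.map_map, sum_map_range]
  rfl

lemma sum_map_flatMap {α β : Type} (l : List α) (g : α → List β) (f : β → Int) :
    ((l.flatMap g).map f).sum = (l.map (fun a => ((g a).map f).sum)).sum := by
  induction l with
  | nil => rfl
  | cons x t ih => simp [List.flatMap_cons, List.map_append, List.sum_append, ih]

lemma sum_filter_ends (a b : Int) (h : 3 ≤ b - a) (g : Int → Int) :
    (((PySem.List.pyRange a b 1).filter (fun j => !(j == a || j == b - 1))).map g).sum
    = ((PySem.List.pyRange a b 1).map g).sum - g a - g (b - 1) := by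
  have h1 : PySem.List.pyRange a b 1 = a :: PySem.List.pyRange (a + 1) b 1 :=
    PySem.List.pyRange_one_cons (by omega)
  have h2 : PySem.List.pyRange (a + 1) b 1
      = PySem.List.pyRange (a + 1) (b - 1) 1 ++ [b - 1] := by
    have := PySem.List.pyRange_one_succ_right (a := a + 1) (b := b - 1) (by omega)
    rw [show b - 1 + 1 = b from by ring] at this
    exact this
  have hmid : (PySem.List.pyRange (a + 1) (b - 1) 1).filter (fun j => !(j == a || j == b - 1))
      = PySem.List.pyRange (a + 1) (b - 1) 1 := by
    apply List.filter_eq_self.mpr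
    intro j hj
    rw [PySem.List.mem_pyRange_one] at hj
    have hja : j ≠ a := by omega
    have hjb : j ≠ b - 1 := by omega
    simp [hja, hjb]
  rw [h1, h2]
  simp only [List.filter_cons, List.filter_append, List.filter_nil, hmid, beq_self_eq_true,
    Bool.true_or, Bool.or_true, Bool.not_true, Bool.false_eq_true, if_false,
    List.map_append, List.map_cons, List.map_nil, List.sum_append, List.sum_cons, List.sum_nil]
  ring

-- a cell list row sum, in closed form
lemma cells_row_sum (x y D : Int) (hD : 3 ≤ D) (f : Int → Int → Int) (i : Int) :
    ((((PySem.List.pyRange (y - D) y 1).filter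
        (fun j => !((i == x - D || i == x - 1) && (j == y - D || j == y - 1)))).map
          (fun j => (i, j))).map (fun p : Int × Int => f p.1 p.2)).sum
    = ((PySem.List.pyRange (y - D) y 1).map (fun j => f i j)).sum
      - (if i = x - D ∨ i = x - 1 then f i (y - D) + f i (y - 1) else 0) := by
  rw [List.map_map]
  have hcomp : ((fun p : Int × Int => f p.1 p.2) ∘ (fun j => (i, j))) = fun j => f i j := rfl
  rw [hcomp]
  by_cases hc : i = x - D ∨ i = x - 1
  · have hrow : ((i == x - D || i == x - 1) : Bool) = true := by
      rcases hc with h | h <;> simp [h]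
    have hfc : (PySem.List.pyRange (y - D) y 1).filter
          (fun j => !((i == x - D || i == x - 1) && (j == y - D || j == y - 1)))
        = (PySem.List.pyRange (y - D) y 1).filter (fun j => !(j == y - D || j == y - 1)) := by
      apply List.filter_congr
      intro j _
      rw [hrow, Bool.true_and]
    rw [hfc, if_pos hc, sum_filter_ends (y - D) y (by omega) (fun j => f i j)]
    ring
  · have hrow : ((i == x - D || i == x - 1) : Bool) = false := by
      have hc1 : i ≠ x - D := fun h => hc (Or.inl h)
      have hc2 : i ≠ x - 1 := fun h => hc (Or.inr h)
      simp [hc1, hc2]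
    have hfc : (PySem.List.pyRange (y - D) y 1).filter
          (fun j => !((i == x - D || i == x - 1) && (j == y - D || j == y - 1)))
        = PySem.List.pyRange (y - D) y 1 := by
      apply List.filter_eq_self.mpr
      intro j _
      rw [hrow, Bool.false_and, Bool.not_false]
    rw [hfc, if_neg hc]
    ring

lemma cells_sum (x y D : Int) (hD : 3 ≤ D) (f : Int → Int → Int) :
    ((cellsB x y D).map (fun p : Int × Int => f p.1 p.2)).sum
    = (∑ k ∈ Finset.range D.toNat, ∑ l ∈ Finset.range D.toNat, f (x - D + k) (y - D + l))
      - f (x - 1) (y - 1) - f (x - D) (y - 1) - f (x - 1) (y - D) - f (x - D) (y - D) := by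
  unfold cellsB
  rw [sum_map_flatMap]
  have hrw : (PySem.List.pyRange (x - D) x 1).map
        (fun i => ((((PySem.List.pyRange (y - D) y 1).filter
          (fun j => !((i == x - D || i == x - 1) && (j == y - D || j == y - 1)))).map
            (fun j => (i, j))).map (fun p : Int × Int => f p.1 p.2)).sum)
      = (PySem.List.pyRange (x - D) x 1).map
        (fun i => ((PySem.List.pyRange (y - D) y 1).map (fun j => f i j)).sum
          - (if i = x - D ∨ i = x - 1 then f i (y - D) + f i (y - 1) else 0)) := by
    apply List.map_congr_left
    intro i _
    exact cells_row_sum x y D hD f i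
  rw [hrw, sum_map_pyRange, show (x - (x - D)).toNat = D.toNat from by omega]
  rw [Finset.sum_sub_distrib]
  have hpart1 : ∀ k : Nat, ((PySem.List.pyRange (y - D) y 1).map (fun j => f (x - D + k) j)).sum
      = ∑ l ∈ Finset.range D.toNat, f (x - D + k) (y - D + l) := by
    intro k
    rw [sum_map_pyRange, show (y - (y - D)).toNat = D.toNat from by omega]
  have hd3 : 3 ≤ D.toNat := by omega
  have hpart2 : (∑ k ∈ Finset.range D.toNat,
        if x - D + (k : Int) = x - D ∨ x - D + (k : Int) = x - 1
        then f (x - D + k) (y - D) + f (x - D + k) (y - 1) else 0)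
      = (f (x - D) (y - D) + f (x - D) (y - 1)) + (f (x - 1) (y - D) + f (x - 1) (y - 1)) := by
    have hsplit : ∀ k ∈ Finset.range D.toNat,
        (if x - D + (k : Int) = x - D ∨ x - D + (k : Int) = x - 1
         then f (x - D + k) (y - D) + f (x - D + k) (y - 1) else 0)
        = (if k = 0 then f (x - D + k) (y - D) + f (x - D + k) (y - 1) else 0)
          + (if k = D.toNat - 1 then f (x - D + k) (y - D) + f (x - D + k) (y - 1) else 0) := by
      intro k hk
      rw [Finset.mem_range] at hk
      by_cases h0 : k = 0
      · subst h0
        rw [if_pos (Or.inl (by ring)), if_pos rfl, if_neg (by omega)]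
        ring
      · by_cases h1 : k = D.toNat - 1
        · subst h1
          rw [if_pos (Or.inr (by omega)), if_neg (by omega), if_pos rfl]
          ring
        · rw [if_neg (by omega), if_neg h0, if_neg h1]
          ring
    rw [Finset.sum_congr rfl hsplit, Finset.sum_add_distrib,
      Finset.sum_ite_eq' (Finset.range D.toNat) 0,
      Finset.sum_ite_eq' (Finset.range D.toNat) (D.toNat - 1),
      if_pos (Finset.mem_range.mpr (by omega)), if_pos (Finset.mem_range.mpr (by omega))]
    norm_num
    rw [show x - D + ((D.toNat - 1 : Nat) : Int) = x - 1 from by omega]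
  rw [Finset.sum_congr rfl (fun k _ => hpart1 k), hpart2]
  ring

lemma getD_oor {α : Type} (l : List α) (i : Nat) (d : α) (h : l.length ≤ i) :
    l.getD i d = d := by
  rw [List.getD_eq_getElem?_getD, List.getElem?_eq_none h]; rfl

lemma getD_map_mul (w : Int) (l : List Int) (c : Nat) :
    (l.map (fun b => w * b)).getD c 0 = w * l.getD c 0 := by
  rw [List.getD_eq_getElem?_getD, List.getElem?_map, List.getD_eq_getElem?_getD]
  cases l[c]? <;> simp

lemma X0_row (B0 : List (List Int)) (i : Nat) :
    ((PySem.List.enumerate B0 0).map (fun p => p.2.map (fun b => (2 * p.1 + 1) * b))).getD i []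
    = (B0.getD i []).map (fun b => (2 * (i : Int) + 1) * b) := by
  rw [PySem.List.enumerate_eq_map_pyRange (d := ([] : List Int)), List.map_map]
  simp only [PySem.List.len_eq]
  by_cases hi : i < B0.length
  · rw [List.getD_eq_getElem?_getD,
      PySem.List.getElem?_map_pyRange_zero _ B0.length i hi]
    simp
  · have hlen : ((PySem.List.pyRange 0 (B0.length : Int) 1).map
        ((fun p : Int × List Int => p.2.map (fun b => (2 * p.1 + 1) * b)) ∘
          (fun j => (j, PySem.List.pyGetD B0 j [])))).length ≤ i := by
      rw [List.length_map, PySem.List.length_pyRange_one]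
      omega
    rw [getD_oor _ _ _ hlen, getD_oor _ _ _ (by omega)]
    rfl

lemma X0_eM (B0 : List (List Int)) (i j : Nat) :
    eM ((PySem.List.enumerate B0 0).map (fun p => p.2.map (fun b => (2 * p.1 + 1) * b))) i j
    = (2 * (i : Int) + 1) * eM B0 i j := by
  unfold eM
  rw [X0_row, getD_map_mul]

lemma X0_rowlen (B0 : List (List Int)) (i : Nat) :
    (((PySem.List.enumerate B0 0).map (fun p => p.2.map (fun b => (2 * p.1 + 1) * b))).getD i []).length
    = (B0.getD i []).length := by
  rw [X0_row, List.length_map]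

lemma X0_length (B0 : List (List Int)) :
    ((PySem.List.enumerate B0 0).map (fun p => p.2.map (fun b => (2 * p.1 + 1) * b))).length
    = B0.length := by
  rw [List.length_map, PySem.List.length_enumerate]

lemma Y0_row (B0 : List (List Int)) (i : Nat) :
    ((B0.map (fun row => (PySem.List.enumerate row 0).map (fun p => (2 * p.1 + 1) * p.2))).getD i [])
    = (PySem.List.enumerate (B0.getD i []) 0).map (fun p => (2 * p.1 + 1) * p.2) := by
  rw [List.getD_eq_getElem?_getD, List.getElem?_map, List.getD_eq_getElem?_getD]
  cases h : B0[i]? with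
  | none => simp
  | some r => simp

lemma Y0_eM (B0 : List (List Int)) (i j : Nat) :
    eM (B0.map (fun row => (PySem.List.enumerate row 0).map (fun p => (2 * p.1 + 1) * p.2))) i j
    = (2 * (j : Int) + 1) * eM B0 i j := by
  unfold eM
  rw [Y0_row, PySem.List.enumerate_eq_map_pyRange (d := (0 : Int)), List.map_map]
  simp only [PySem.List.len_eq]
  by_cases hj : j < (B0.getD i []).length
  · rw [List.getD_eq_getElem?_getD,
      PySem.List.getElem?_map_pyRange_zero _ (B0.getD i []).length j hj]
    simp
  · have hlen : ((PySem.List.pyRange 0 ((B0.getD i []).length : Int) 1).map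
        ((fun p : Int × Int => (2 * p.1 + 1) * p.2) ∘
          (fun j => (j, PySem.List.pyGetD (B0.getD i []) j 0)))).length ≤ j := by
      rw [List.length_map, PySem.List.length_pyRange_one]
      omega
    rw [getD_oor _ _ _ hlen, getD_oor _ _ _ (by omega)]
    ring

lemma Y0_rowlen (B0 : List (List Int)) (i : Nat) :
    ((B0.map (fun row => (PySem.List.enumerate row 0).map (fun p => (2 * p.1 + 1) * p.2))).getD i []).length
    = (B0.getD i []).length := by
  rw [Y0_row, List.length_map, PySem.List.length_enumerate]

lemma Y0_length (B0 : List (List Int)) :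
    (B0.map (fun row => (PySem.List.enumerate row 0).map (fun p => (2 * p.1 + 1) * p.2))).length
    = B0.length := List.length_map ..

theorem solve_spec : Claim_equal_solve := by
  intro R C B0 _ hpre
  obtain ⟨hne, hge, hbound⟩ := hpre
  unfold Spec_solve
  by_cases hmin : 3 ≤ min R C
  case neg =>
    simp only [solve, solve_alt,
      PySem.List.pyRange_neg_one_eq_nil (show min R C ≤ 2 from by omega),
      List.findSome?_nil]
  simp only [solve, solve_alt]
  congr 1
  apply findSome?_congr
  intro D hD
  rw [PySem.List.mem_pyRange_neg_one] at hD
  apply findSome?_congr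
  intro x hx
  rw [PySem.List.mem_pyRange_one] at hx
  apply findSome?_congr
  intro y hy
  rw [PySem.List.mem_pyRange_one] at hy
  -- bounds
  have hD3 : 3 ≤ D := by omega
  obtain ⟨hRn, hCL⟩ := hbound (by omega)
  have hxn : x ≤ (B0.length : Int) := by omega
  have hyL : y ≤ ((B0.headD []).length : Int) := by omega
  have hrowD : ∀ i, i < B0.length → (B0.headD []).length ≤ (B0.getD i []).length := by
    intro i hi
    apply hge
    rw [List.getD_eq_getElem?_getD, List.getElem?_eq_getElem hi]
    exact List.getElem_mem hi
  have hheadX : (((PySem.List.enumerate B0 0).map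
      (fun p => p.2.map (fun b => (2 * p.1 + 1) * b))).headD []).length
      = (B0.headD []).length := by
    rw [headD_eq_getD, X0_rowlen, ← headD_eq_getD]
  have hheadY : ((B0.map (fun row => (PySem.List.enumerate row 0).map
      (fun p => (2 * p.1 + 1) * p.2))).headD []).length = (B0.headD []).length := by
    rw [headD_eq_getD, Y0_rowlen, ← headD_eq_getD]
  -- index-cast bridge for the box sums
  have hcast : ∀ (k l : Nat), (k : Int) < D → (l : Int) < D →
      g2 B0 (x - D + (k : Int)) (y - D + (l : Int))
      = eM B0 ((x - D).toNat + k) ((y - D).toNat + l) := by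
    intro k l _ _
    rw [show x - D + (k : Int) = (((x - D).toNat + k : Nat) : Int) from by push_cast; omega,
      show y - D + (l : Int) = (((y - D).toNat + l : Nat) : Int) from by push_cast; omega,
      g2_natCast]
  have hkD : ∀ k ∈ Finset.range D.toNat, (k : Int) < D := by
    intro k hk
    rw [Finset.mem_range] at hk
    omega
  -- mass
  have hmass : get_value (aggregate B0) B0 x y D
      = ((cellsB x y D).map (fun p : Int × Int => g2 B0 p.1 p.2)).sum := by
    have hcs := cells_sum x y D hD3 (fun i j => g2 B0 i j)
    simp only [] at hcs
    have hS : (∑ k ∈ Finset.range D.toNat, ∑ l ∈ Finset.range D.toNat,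
        g2 B0 (x - D + (k : Int)) (y - D + (l : Int)))
        = ∑ k ∈ Finset.range D.toNat, ∑ l ∈ Finset.range D.toNat,
          eM B0 ((x - D).toNat + k) ((y - D).toNat + l) := by
      apply Finset.sum_congr rfl
      intro k hk
      apply Finset.sum_congr rfl
      intro l hl
      exact hcast k l (hkD k hk) (hkD l hl)
    rw [hcs, get_value_eq B0 B0.length (B0.headD []).length rfl rfl hrowD x y D hD3
      (by omega) hxn (by omega) hyL, hS]
  -- X torque
  have hgX : ∀ (u v : Int), 0 ≤ u → 0 ≤ v →
      g2 ((PySem.List.enumerate B0 0).map (fun p => p.2.map (fun b => (2 * p.1 + 1) * b))) u v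
      = (2 * u + 1) * g2 B0 u v := by
    intro u v hu hv
    rw [show u = ((u.toNat : Nat) : Int) from by omega,
      show v = ((v.toNat : Nat) : Int) from by omega, g2_natCast, g2_natCast, X0_eM]
  have hX : get_value
      (aggregate ((PySem.List.enumerate B0 0).map (fun p => p.2.map (fun b => (2 * p.1 + 1) * b))))
      ((PySem.List.enumerate B0 0).map (fun p => p.2.map (fun b => (2 * p.1 + 1) * b))) x y D
      = ((cellsB x y D).map (fun p : Int × Int => (2 * p.1 + 1) * g2 B0 p.1 p.2)).sum := by
    have hcs := cells_sum x y D hD3 (fun i j => (2 * i + 1) * g2 B0 i j)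
    simp only [] at hcs
    have hS : (∑ k ∈ Finset.range D.toNat, ∑ l ∈ Finset.range D.toNat,
        (2 * (x - D + (k : Int)) + 1) * g2 B0 (x - D + (k : Int)) (y - D + (l : Int)))
        = ∑ k ∈ Finset.range D.toNat, ∑ l ∈ Finset.range D.toNat,
          eM ((PySem.List.enumerate B0 0).map (fun p => p.2.map (fun b => (2 * p.1 + 1) * b)))
            ((x - D).toNat + k) ((y - D).toNat + l) := by
      apply Finset.sum_congr rfl
      intro k hk
      apply Finset.sum_congr rfl
      intro l hl
      rw [X0_eM, hcast k l (hkD k hk) (hkD l hl),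
        show 2 * (x - D + (k : Int)) + 1 = 2 * (((x - D).toNat + k : Nat) : Int) + 1 from by
          push_cast; omega]
    rw [hcs, get_value_eq _ B0.length (B0.headD []).length (X0_length B0) hheadX
      (fun i hi => by rw [X0_rowlen]; exact hrowD i hi) x y D hD3
      (by omega) hxn (by omega) hyL, ← hS,
      hgX (x - 1) (y - 1) (by omega) (by omega), hgX (x - D) (y - 1) (by omega) (by omega),
      hgX (x - 1) (y - D) (by omega) (by omega), hgX (x - D) (y - D) (by omega) (by omega)]
  -- Y torque
  have hgY : ∀ (u v : Int), 0 ≤ u → 0 ≤ v →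
      g2 (B0.map (fun row => (PySem.List.enumerate row 0).map (fun p => (2 * p.1 + 1) * p.2))) u v
      = (2 * v + 1) * g2 B0 u v := by
    intro u v hu hv
    rw [show u = ((u.toNat : Nat) : Int) from by omega,
      show v = ((v.toNat : Nat) : Int) from by omega, g2_natCast, g2_natCast, Y0_eM]
  have hY : get_value
      (aggregate (B0.map (fun row => (PySem.List.enumerate row 0).map (fun p => (2 * p.1 + 1) * p.2))))
      (B0.map (fun row => (PySem.List.enumerate row 0).map (fun p => (2 * p.1 + 1) * p.2))) x y D
      = ((cellsB x y D).map (fun p : Int × Int => (2 * p.2 + 1) * g2 B0 p.1 p.2)).sum := by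
    have hcs := cells_sum x y D hD3 (fun i j => (2 * j + 1) * g2 B0 i j)
    simp only [] at hcs
    have hS : (∑ k ∈ Finset.range D.toNat, ∑ l ∈ Finset.range D.toNat,
        (2 * (y - D + (l : Int)) + 1) * g2 B0 (x - D + (k : Int)) (y - D + (l : Int)))
        = ∑ k ∈ Finset.range D.toNat, ∑ l ∈ Finset.range D.toNat,
          eM (B0.map (fun row => (PySem.List.enumerate row 0).map (fun p => (2 * p.1 + 1) * p.2)))
            ((x - D).toNat + k) ((y - D).toNat + l) := by
      apply Finset.sum_congr rfl
      intro k hk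
      apply Finset.sum_congr rfl
      intro l hl
      rw [Y0_eM, hcast k l (hkD k hk) (hkD l hl),
        show 2 * (y - D + (l : Int)) + 1 = 2 * (((y - D).toNat + l : Nat) : Int) + 1 from by
          push_cast; omega]
    rw [hcs, get_value_eq _ B0.length (B0.headD []).length (Y0_length B0) hheadY
      (fun i hi => by rw [Y0_rowlen]; exact hrowD i hi) x y D hD3
      (by omega) hxn (by omega) hyL, ← hS,
      hgY (x - 1) (y - 1) (by omega) (by omega), hgY (x - D) (y - 1) (by omega) (by omega),
      hgY (x - 1) (y - D) (by omega) (by omega), hgY (x - D) (y - D) (by omega) (by omega)]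
  rw [hmass, hX, hY]
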